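-- pv_equiv track=rewrite | github.com/qawl987/ESG-GPT | notebooks/utils/utils.py | _convert_onehot
-- ===== SOURCE A (Python) =====
-- def _convert_onehot(row):
--     y = []
--     for i in range(27):
--         if i in row:
--             y.append(1)
--         else:
--             y.append(0)
--     return y
-- ===== SOURCE B (Python) =====
-- def _convert_onehot(row):
--     # scatter: allocate zeros, then mark indices present in row
--     y = [0] * 27
--     for v in row:
--         if 0 <= v < 27:
--             y[v] = 1
--     return y
-- ===== Notes on version B (the rewrite author's own statement) =====
-- stated objective: faster
-- what changed: Replaces A's probe over each of the 27 index slots (an O(n) membership scan of row per slot) by a single scatter pass over row into a preallocated zero array.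
import Mathlib
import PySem

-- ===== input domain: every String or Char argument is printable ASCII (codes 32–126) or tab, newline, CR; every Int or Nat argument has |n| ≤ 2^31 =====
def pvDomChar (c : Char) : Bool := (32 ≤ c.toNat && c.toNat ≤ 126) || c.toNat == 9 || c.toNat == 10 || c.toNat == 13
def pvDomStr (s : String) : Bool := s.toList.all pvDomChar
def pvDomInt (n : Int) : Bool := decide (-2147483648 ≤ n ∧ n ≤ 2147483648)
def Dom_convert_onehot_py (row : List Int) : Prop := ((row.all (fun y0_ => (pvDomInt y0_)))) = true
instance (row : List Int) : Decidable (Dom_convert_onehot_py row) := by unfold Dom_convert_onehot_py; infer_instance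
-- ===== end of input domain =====

-- B replaces the 27-slot membership probe by a single scatter pass over row (alternative decomposition).
-- ===== PORT A =====
-- y = []; for i in range(27): append 1 if i in row else 0
def convert_onehot_py (row : List Int) : List Int :=
  (PySem.List.pyRange 0 27 1).foldl
    (fun y i => if i ∈ row then y ++ [(1 : Int)] else y ++ [(0 : Int)]) []

-- ===== PORT B =====
-- B: y = [0]*27; for v in row: if 0 <= v < 27: y[v] = 1
def convert_onehot_py_alt (row : List Int) : List Int :=
  row.foldl
    (fun y v => if 0 ≤ v ∧ v < 27 then y.set v.toNat 1 else y)
    (List.replicate 27 (0 : Int))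

-- ===== PRECONDITION & SPEC =====
def Spec_convert_onehot_py (row : List Int) (out : List Int) : Prop := out = convert_onehot_py_alt row
instance (row : List Int) (out : List Int) : Decidable (Spec_convert_onehot_py row out) := by unfold Spec_convert_onehot_py; infer_instance

-- ===== CLAIM (what is proved, stated in full; the proofs are below) =====
def Claim_equal_convert_onehot_py : Prop := ∀ (row : List Int), Dom_convert_onehot_py row → Spec_convert_onehot_py row (convert_onehot_py row)

-- ===== LEMMAS AND PROOFS =====

theorem scatter_length (row : List Int) (init : List Int) :
    (row.foldl (fun y v => if 0 ≤ v ∧ v < 27 then y.set v.toNat 1 else y) init).length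
      = init.length := by
  induction row generalizing init with
  | nil => rfl
  | cons v t ih =>
    simp only [List.foldl_cons]
    split_ifs <;> simp [ih]

theorem scatter_get (row : List Int) (init : List Int) (k : Nat) (hk : k < init.length) :
    (row.foldl (fun y v => if 0 ≤ v ∧ v < 27 then y.set v.toNat 1 else y) init)[k]'(by
        rw [scatter_length]; exact hk)
      = if ((k : Int) ∈ row ∧ (k : Int) < 27) then (1 : Int) else init[k] := by
  induction row generalizing init with
  | nil => simp
  | cons v t ih =>
    simp only [List.foldl_cons]
    by_cases hv : 0 ≤ v ∧ v < 27
    · simp only [if_pos hv]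
      rw [ih _ (by simpa using hk)]
      by_cases hvk : v = (k : Int)
      · subst hvk
        simp [hv.2, List.getElem_set_self]
      · have : (k:Int) ∈ v :: t ↔ (k:Int) ∈ t := by
          simp [List.mem_cons, Ne.symm hvk]
        rw [List.getElem_set_ne (by
          intro h; apply hvk
          rw [← h, Int.toNat_of_nonneg hv.1])]
        simp [this]
    · simp only [if_neg hv]
      rw [ih _ hk]
      by_cases hvk : v = (k : Int)
      · subst hvk
        have h27 : ¬ ((k : Int) < 27) := fun h => hv ⟨Int.natCast_nonneg k, h⟩
        simp [h27]
      · simp [List.mem_cons, Ne.symm hvk]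


-- ===== VERDICT (by name: the statement is the Claim_ definition above) =====
theorem convert_onehot_py_spec : Claim_equal_convert_onehot_py := by
  intro row _
  unfold Spec_convert_onehot_py convert_onehot_py convert_onehot_py_alt
  have hA : (PySem.List.pyRange 0 27 1).foldl
      (fun y i => if i ∈ row then y ++ [(1 : Int)] else y ++ [(0 : Int)]) []
      = (PySem.List.pyRange 0 27 1).map (fun i => if i ∈ row then (1 : Int) else 0) := by
    have : ∀ (y : List Int) (i : Int),
        (if i ∈ row then y ++ [(1 : Int)] else y ++ [(0 : Int)])
          = y ++ [if i ∈ row then (1 : Int) else 0] := by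
      intro y i; split_ifs <;> rfl
    simp only [this]
    simpa using PySem.List.foldl_append_singleton_eq_map
      (fun i => if i ∈ row then (1 : Int) else 0) (PySem.List.pyRange 0 27 1) []
  rw [hA]
  apply List.ext_getElem
  · simp [scatter_length, PySem.List.length_pyRange_one]
  · intro k h1 h2
    have hk27 : k < 27 := by
      simpa [PySem.List.length_pyRange_one] using h1
    rw [List.getElem_map, PySem.List.getElem_pyRange_one,
        scatter_get row _ k (by simpa using hk27)]
    have hmem : ((k : Int) ∈ row ∧ (k : Int) < 27) ↔ (k : Int) ∈ row := by
      constructor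
      · exact fun h => h.1
      · exact fun h => ⟨h, by exact_mod_cast hk27⟩
    rw [if_congr hmem rfl rfl, zero_add]
    split_ifs with h
    · rfl
    · exact (List.getElem_replicate _).symm
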